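-- pv_equiv track=rewrite | github.com/LandonBecker/Phlash | server/annotate.py | merge
-- ===== SOURCE A (Python) =====
-- def merge(list1, list2):
--    merged_list = []
--    for i in range(max((len(list1), len(list2)))):
--       while True:
--          try:
--             tup = [list1[i], list2[i]]
--          except IndexError:
--             if len(list1) > len(list2):
--                list2.append('')
--                tup = [list1[i], list2[i]]
--             elif len(list1) < len(list2):
--                list1.append('')
--                tup = [list1[i], list2[i]]
--             continue
--          merged_list.append(tup)
--          break
--    return merged_list
-- ===== SOURCE B (Python) =====
-- def merge(list1, list2):
--     n = max(len(list1), len(list2))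
--     list1.extend([''] * (n - len(list1)))
--     list2.extend([''] * (n - len(list2)))
--     return [[list1[i], list2[i]] for i in range(n)]
-- ===== Notes on version B (the rewrite author's own statement) =====
-- stated objective: simpler
-- what changed: B pads both lists to the common length up front with extend (keeping A's in-place side effect) and then builds the pairs in one plain comprehension, replacing A's try/except IndexError with a while-True retry loop that pads on demand.
import Mathlib
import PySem

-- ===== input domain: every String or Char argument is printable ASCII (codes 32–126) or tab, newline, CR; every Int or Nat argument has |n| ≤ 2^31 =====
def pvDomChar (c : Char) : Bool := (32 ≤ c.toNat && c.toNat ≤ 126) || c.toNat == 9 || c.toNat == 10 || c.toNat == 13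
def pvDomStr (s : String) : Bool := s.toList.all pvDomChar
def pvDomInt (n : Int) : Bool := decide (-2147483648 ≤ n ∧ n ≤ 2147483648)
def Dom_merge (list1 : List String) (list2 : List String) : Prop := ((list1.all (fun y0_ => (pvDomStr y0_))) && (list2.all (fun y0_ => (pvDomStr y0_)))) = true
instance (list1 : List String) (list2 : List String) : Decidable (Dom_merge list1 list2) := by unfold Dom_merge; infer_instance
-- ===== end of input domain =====

-- B pads both lists to the common length up front and zips in one pass, replacing A's
-- try/except pad-on-demand retry loop; simpler decomposition, same O(n) cost.
-- A mutates its arguments in place (extends the shorter with ''); B performs the same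
-- mutation in Python; the equivalence proved here is about the return value.


-- ===== PORT A =====
-- the `while True: try … except IndexError: pad-shorter; continue` body for index i:
-- returns the (possibly extended) lists and the tuple appended to merged_list.
-- The final `else` branch (equal lengths, index still out of range) is where Python
-- would loop forever; it is unreachable for i < max(len1,len2) and is only a totality guard.
def mergeInner (i : Nat) (l1 l2 : List String) : List String × List String × List String :=
  if h : i < l1.length ∧ i < l2.length then
    (l1, l2, [l1[i], l2[i]])
  else if hgt : l2.length < l1.length then
    mergeInner i l1 (l2 ++ [""])
  else if hlt : l1.length < l2.length then
    mergeInner i (l1 ++ [""]) l2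
  else (l1, l2, [])
termination_by (i + 1 - l1.length) + (i + 1 - l2.length)
decreasing_by
  · simp only [List.length_append, List.length_cons, List.length_nil]; omega
  · simp only [List.length_append, List.length_cons, List.length_nil]; omega

def merge (list1 : List String) (list2 : List String) : List (List String) :=
  ((List.range (max list1.length list2.length)).foldl
    (fun (st : List String × List String × List (List String)) i =>
      let (l1, l2, acc) := st
      let (l1', l2', tup) := mergeInner i l1 l2
      (l1', l2', acc ++ [tup]))
    (list1, list2, [])).2.2

-- ===== PORT B =====
-- list.extend([''] * k) is ported as ++ List.replicate k ""; the comprehension's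
-- list[i] is always in range after padding, ported as getD with default "".
def merge_alt (list1 : List String) (list2 : List String) : List (List String) :=
  let n := max list1.length list2.length
  let p1 := list1 ++ List.replicate (n - list1.length) ""
  let p2 := list2 ++ List.replicate (n - list2.length) ""
  (List.range n).map (fun i => [p1.getD i "", p2.getD i ""])

-- ===== PRECONDITION & SPEC =====
def Spec_merge (list1 : List String) (list2 : List String) (out : List (List String)) : Prop := out = merge_alt list1 list2
instance (list1 : List String) (list2 : List String) (out : List (List String)) : Decidable (Spec_merge list1 list2 out) := by unfold Spec_merge; infer_instance

-- ===== CLAIM (what is proved, stated in full; the proofs are below) =====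
def Claim_equal_merge : Prop := ∀ (list1 : List String) (list2 : List String), Dom_merge list1 list2 → Spec_merge list1 list2 (merge list1 list2)

-- ===== LEMMAS AND PROOFS =====

def pad (l : List String) (k : Nat) : List String := l ++ List.replicate (k - l.length) ""

theorem pad_length (l : List String) (k : Nat) : (pad l k).length = max l.length k := by
  simp [pad]; omega

theorem pad_getD (l : List String) (k i : Nat) :
    (pad l k).getD i "" = l.getD i "" := by
  unfold pad
  rcases Nat.lt_or_ge i l.length with h | h
  · simp [List.getD, List.getElem?_append_left h]
  · simp [List.getD, List.getElem?_append_right h, List.getElem?_replicate,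
      List.getElem?_eq_none h]
    split_ifs <;> rfl

theorem pad_succ_of_lt (l : List String) (k : Nat) (h : k < l.length) :
    pad l (k + 1) = pad l k := by
  unfold pad
  have h1 : k + 1 - l.length = 0 := by omega
  have h2 : k - l.length = 0 := by omega
  rw [h1, h2]

theorem pad_succ_of_ge (l : List String) (k : Nat) (h : l.length ≤ k) :
    pad l (k + 1) = pad l k ++ [""] := by
  unfold pad
  have : k + 1 - l.length = (k - l.length) + 1 := by omega
  rw [this, List.replicate_succ' , ← List.append_assoc]

theorem getD_in (l : List String) (k : Nat) (h : k < l.length) : l.getD k "" = l[k] := by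
  simp [List.getD, List.getElem?_eq_getElem h]

theorem mergeInner_in (k : Nat) (l1 l2 : List String)
    (h1 : k < l1.length) (h2 : k < l2.length) :
    mergeInner k l1 l2 = (l1, l2, [l1.getD k "", l2.getD k ""]) := by
  rw [mergeInner, dif_pos ⟨h1, h2⟩, getD_in _ _ h1, getD_in _ _ h2]

theorem mergeInner_pad (l1 l2 : List String) (k : Nat)
    (hk : k < max l1.length l2.length) :
    mergeInner k (pad l1 k) (pad l2 k) =
      (pad l1 (k + 1), pad l2 (k + 1), [l1.getD k "", l2.getD k ""]) := by
  have hl1 : (pad l1 k).length = max l1.length k := pad_length l1 k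
  have hl2 : (pad l2 k).length = max l2.length k := pad_length l2 k
  rcases Nat.lt_or_ge k l1.length with h1 | h1 <;> rcases Nat.lt_or_ge k l2.length with h2 | h2
  · -- both indices in range: first branch, no padding
    rw [mergeInner_in k _ _ (by omega) (by omega), pad_getD, pad_getD,
      pad_succ_of_lt _ _ h1, pad_succ_of_lt _ _ h2]
  · -- k < len1, k ≥ len2 : list2 is the shorter one, pad it once then succeed
    rw [mergeInner, dif_neg (by omega), dif_pos (by omega : (pad l2 k).length < (pad l1 k).length),
      ← pad_succ_of_ge l2 k h2, ← pad_succ_of_lt l1 k h1,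
      mergeInner_in k _ _ (by rw [pad_length]; omega) (by rw [pad_length]; omega),
      pad_getD, pad_getD]
  · -- k ≥ len1, k < len2 : list1 is the shorter one, pad it once then succeed
    rw [mergeInner, dif_neg (by omega), dif_neg (by omega), dif_pos (by omega : (pad l1 k).length < (pad l2 k).length),
      ← pad_succ_of_ge l1 k h1, ← pad_succ_of_lt l2 k h2,
      mergeInner_in k _ _ (by rw [pad_length]; omega) (by rw [pad_length]; omega),
      pad_getD, pad_getD]
  · omega

theorem merge_fold (l1 l2 : List String) (k : Nat) (hk : k ≤ max l1.length l2.length) :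
    (List.range k).foldl
      (fun (st : List String × List String × List (List String)) i =>
        let (a, b, acc) := st
        let (a', b', tup) := mergeInner i a b
        (a', b', acc ++ [tup]))
      (l1, l2, []) =
      (pad l1 k, pad l2 k, (List.range k).map (fun i => [l1.getD i "", l2.getD i ""])) := by
  induction k with
  | zero => simp [pad]
  | succ k ih =>
    rw [List.range_succ, List.foldl_append, ih (by omega), List.map_append]
    simp only [List.foldl_cons, List.foldl_nil, List.map_cons, List.map_nil]
    rw [mergeInner_pad l1 l2 k (by omega)]

theorem merge_eq (list1 list2 : List String) : merge list1 list2 = merge_alt list1 list2 := by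
  unfold merge merge_alt
  rw [merge_fold list1 list2 (max list1.length list2.length) (le_refl _)]
  simp only []
  exact List.map_congr_left (fun i _ => by rw [show list1 ++ List.replicate (max list1.length list2.length - list1.length) "" = pad list1 (max list1.length list2.length) from rfl,
    show list2 ++ List.replicate (max list1.length list2.length - list2.length) "" = pad list2 (max list1.length list2.length) from rfl,
    pad_getD, pad_getD])

-- ===== VERDICT (by name: the statement is the Claim_ definition above) =====
theorem merge_spec : Claim_equal_merge := by
  intro l1 l2 _
  unfold Spec_merge
  exact merge_eq l1 l2
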